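-- pv_equiv track=rewrite | github.com/khoalva/CO3093-Computer-Network-Assignment-1 | Peer.py | get_rarest_chunk
-- ===== SOURCE A (Python) =====
-- def get_rarest_chunk(peers, needed_chunks):
--     # Tìm mảnh tệp hiếm nhất mà chúng ta chưa có
--     chunk_count = {chunk: 0 for chunk in needed_chunks}
--     for peer in peers:
--         for chunk in peer['chunks']:
--             if chunk in chunk_count:
--                 chunk_count[chunk] += 1
--
--     # Sắp xếp theo số lần xuất hiện tăng dần
--     rarest_chunk = sorted(chunk_count.items(), key=lambda item: item[1])[0][0]
--     return rarest_chunk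
-- ===== SOURCE B (Python) =====
-- def get_rarest_chunk(peers, needed_chunks):
--     # Invert the loops: compute each needed chunk's availability directly and
--     # keep a running first-minimum, instead of accumulating a dict and sorting it.
--     best = None
--     best_count = None
--     for chunk in dict.fromkeys(needed_chunks):
--         count = sum(peer['chunks'].count(chunk) for peer in peers)
--         if best_count is None or count < best_count:
--             best, best_count = chunk, count
--     return best
-- ===== Notes on version B (the rewrite author's own statement) =====
-- stated objective: alternative
-- what changed: Instead of accumulating a count dict over all peers' chunks and stably sorting its items to pick the first-minimal key, B iterates over the deduplicated needed chunks, computes each chunk's availability directly by summing per-peer counts, and keeps a running first-minimum; no dict of counts and no sort.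
import Mathlib
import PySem

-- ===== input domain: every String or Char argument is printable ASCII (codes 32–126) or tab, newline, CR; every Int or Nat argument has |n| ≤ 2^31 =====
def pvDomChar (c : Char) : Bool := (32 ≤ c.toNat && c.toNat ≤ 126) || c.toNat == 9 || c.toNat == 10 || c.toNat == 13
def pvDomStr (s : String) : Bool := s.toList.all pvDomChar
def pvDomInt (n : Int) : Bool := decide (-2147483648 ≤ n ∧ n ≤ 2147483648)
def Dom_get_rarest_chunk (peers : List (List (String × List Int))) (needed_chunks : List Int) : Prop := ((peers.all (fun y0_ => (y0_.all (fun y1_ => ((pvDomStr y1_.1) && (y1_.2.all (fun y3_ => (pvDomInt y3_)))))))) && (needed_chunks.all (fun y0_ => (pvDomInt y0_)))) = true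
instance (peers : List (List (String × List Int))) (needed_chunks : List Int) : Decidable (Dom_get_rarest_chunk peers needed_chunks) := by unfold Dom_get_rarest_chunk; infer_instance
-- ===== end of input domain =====

-- B replaces A's count-dict + stable sort with a direct per-chunk availability sum and a running first-minimum over the deduplicated needed chunks (same value, different algorithm; not faster).


-- peer['chunks'] on the association list (first match; a missing key is Python's KeyError, excluded by Pre_)
def pvChunksOf (peer : List (String × List Int)) : List Int :=
  match peer.find? (fun p => p.1 == "chunks") with
  | some p => p.2
  | none => []

-- ===== PORT A =====
-- chunk_count = {chunk: 0 for chunk in needed_chunks};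
-- for peer in peers: for chunk in peer['chunks']: if chunk in chunk_count: chunk_count[chunk] += 1;
-- return sorted(chunk_count.items(), key=lambda item: item[1])[0][0]   ([0] on [] = IndexError, excluded by Pre_)
def get_rarest_chunk (peers : List (List (String × List Int))) (needed_chunks : List Int) : Int :=
  match PySem.List.sorted
      (peers.foldl (fun d peer =>
          (pvChunksOf peer).foldl
            (fun d chunk => if d.contains chunk then d.modify chunk 0 (· + 1) else d) d)
        (needed_chunks.foldl (fun d chunk => d.insert chunk 0) (PySem.Dict.empty : PySem.Dict Int Int))).items
      (fun item => item.2) false with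
  | [] => 0
  | p :: _ => p.1

-- ===== PORT B =====
-- best/best_count loop over dict.fromkeys(needed_chunks), carried as one Option pair;
-- count = sum(peer['chunks'].count(chunk) for peer in peers)
def get_rarest_chunk_alt (peers : List (List (String × List Int))) (needed_chunks : List Int) : Int :=
  match (PySem.List.dedup needed_chunks).foldl (fun (best : Option (Int × Int)) chunk =>
      let count : Int := (peers.map (fun peer => ((PySem.List.count (pvChunksOf peer) chunk : Nat) : Int))).sum
      match best with
      | none => some (chunk, count)
      | some (b, bc) => if count < bc then some (chunk, count) else some (b, bc)) none with
  | some (b, _) => b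
  | none => 0   -- 'return None': unreachable under Pre_ (needed_chunks ≠ [])

-- ===== PRECONDITION & SPEC =====
-- Pre_ excludes exactly the inputs on which A raises: empty needed_chunks (IndexError on [0])
-- and a peer dict without a 'chunks' key (KeyError).
def Pre_get_rarest_chunk (peers : List (List (String × List Int))) (needed_chunks : List Int) : Prop :=
  needed_chunks ≠ [] ∧ ∀ peer ∈ peers, "chunks" ∈ peer.map Prod.fst
instance (peers : List (List (String × List Int))) (needed_chunks : List Int) : Decidable (Pre_get_rarest_chunk peers needed_chunks) := by unfold Pre_get_rarest_chunk; infer_instance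
def pvWitness_get_rarest_chunk : (List (List (String × List Int))) × List Int :=
  ([[("chunks", [1, 2])], [("chunks", [2])]], [1, 2, 3])

def Spec_get_rarest_chunk (peers : List (List (String × List Int))) (needed_chunks : List Int) (out : Int) : Prop := out = get_rarest_chunk_alt peers needed_chunks
instance (peers : List (List (String × List Int))) (needed_chunks : List Int) (out : Int) : Decidable (Spec_get_rarest_chunk peers needed_chunks out) := by unfold Spec_get_rarest_chunk; infer_instance

-- ===== CLAIM (what is proved, stated in full; the proofs are below) =====
def Claim_equal_get_rarest_chunk : Prop := ∀ (peers : List (List (String × List Int))) (needed_chunks : List Int), Dom_get_rarest_chunk peers needed_chunks → Pre_get_rarest_chunk peers needed_chunks → Spec_get_rarest_chunk peers needed_chunks (get_rarest_chunk peers needed_chunks)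

-- ===== LEMMAS AND PROOFS =====

-- head of a stable insertion: the head changes iff the new element's key is strictly smaller
theorem pv_head_insertBy {α κ : Type} [LinearOrder κ] (key : α → κ) (x : α) (ys : List α) :
    (PySem.List.insertBy (fun a b => decide (key a < key b)) x ys).head? =
      some (match ys.head? with
            | none => x
            | some h => if key x < key h then x else h) := by
  cases ys with
  | nil => simp [PySem.List.insertBy]
  | cons y ys =>
    simp only [PySem.List.insertBy]
    by_cases h : key x < key y <;> simp [h]

theorem pv_head_foldl_insertBy {α κ : Type} [LinearOrder κ] (key : α → κ) :
    ∀ (xs acc : List α),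
      (xs.foldl (fun acc x => PySem.List.insertBy (fun a b => decide (key a < key b)) x acc) acc).head? =
        xs.foldl (fun (b : Option α) x =>
          some (match b with
                | none => x
                | some h => if key x < key h then x else h)) acc.head? := by
  intro xs
  induction xs with
  | nil => intro acc; rfl
  | cons x t ih =>
    intro acc
    simp only [List.foldl_cons, ih, pv_head_insertBy]

-- head of Python's stable sort = min(xs, key=key) (the first extremal element)
theorem pv_head_sorted_eq_min? {α κ : Type} [LinearOrder κ] (xs : List α) (key : α → κ) :
    (PySem.List.sorted xs key false).head? = PySem.List.min? xs key := by
  rw [PySem.List.sorted_eq_foldl_insertBy, pv_head_foldl_insertBy key xs []]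
  unfold PySem.List.min?
  simp only [List.head?]
  apply PySem.List.foldl_congr_mem
  intro b x _
  cases b with
  | none => rfl
  | some h => by_cases h' : key x < key h <;> simp [h']

-- the seed dict maps everything to 0 under default 0
theorem pv_getD_seed (l : List Int) (k : Int) :
    ∀ (d : PySem.Dict Int Int), (∀ j, d.getD j 0 = 0) →
      (l.foldl (fun d chunk => d.insert chunk 0) d).getD k 0 = 0 := by
  induction l with
  | nil => intro d h; exact h k
  | cons c t ih =>
    intro d h
    simp only [List.foldl_cons]
    exact ih _ (fun j => by rw [PySem.Dict.getD_insert]; split <;> simp [h])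

theorem pv_keys_seed (l : List Int) :
    (l.foldl (fun d chunk => d.insert chunk 0) (PySem.Dict.empty : PySem.Dict Int Int)).keys
      = PySem.Set.ofList l := by
  rw [PySem.Dict.keys_foldl_insert l (fun _ _ => (0 : Int)) PySem.Dict.empty,
    PySem.Dict.keys_empty, PySem.Set.ofList_eq_foldl]
  rfl

-- one step of A's counting loop
def pvStep (d : PySem.Dict Int Int) (chunk : Int) : PySem.Dict Int Int :=
  if d.contains chunk then d.modify chunk 0 (· + 1) else d

theorem pv_keys_step (d : PySem.Dict Int Int) (c : Int) : (pvStep d c).keys = d.keys := by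
  unfold pvStep
  by_cases h : d.contains c = true
  · rw [if_pos h, PySem.Dict.keys_modify, PySem.Dict.keys_insert_of_contains _ _ h]
  · rw [if_neg h]

theorem pv_keys_foldl_step (l : List Int) :
    ∀ (d : PySem.Dict Int Int), (l.foldl pvStep d).keys = d.keys := by
  induction l with
  | nil => intro d; rfl
  | cons c t ih => intro d; rw [List.foldl_cons, ih, pv_keys_step]

theorem pv_contains_step (d : PySem.Dict Int Int) (c k : Int) :
    (pvStep d c).contains k = d.contains k := by
  rw [PySem.Dict.contains_eq_decide_mem_keys, PySem.Dict.contains_eq_decide_mem_keys, pv_keys_step]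

-- A's counting loop, characterised: each key inside the dict accumulates its count
theorem pv_getD_foldl_step (k : Int) (l : List Int) :
    ∀ (d : PySem.Dict Int Int),
      (l.foldl pvStep d).getD k 0 =
        d.getD k 0 + (if d.contains k = true then (l.count k : Int) else 0) := by
  induction l with
  | nil => intro d; simp
  | cons c t ih =>
    intro d
    rw [List.foldl_cons, ih (pvStep d c), pv_contains_step]
    unfold pvStep
    by_cases hc : d.contains c = true
    · rw [if_pos hc, PySem.Dict.getD_modify]
      by_cases hkc : k = c
      · subst hkc
        rw [if_pos rfl, if_pos hc, if_pos hc, List.count_cons_self]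
        push_cast
        ring
      · rw [if_neg hkc]
        simp [show ¬ c = k from fun h => hkc h.symm]
    · rw [if_neg hc]
      by_cases hkc : k = c
      · subst hkc
        simp [hc]
      · simp [show ¬ c = k from fun h => hkc h.symm]

-- availability of chunk k: A's flattened count equals B's per-peer sum
theorem pv_cnt_eq (peers : List (List (String × List Int))) (k : Int) :
    (((peers.map pvChunksOf).flatten.count k : Nat) : Int) =
      (peers.map (fun peer => ((PySem.List.count (pvChunksOf peer) k : Nat) : Int))).sum := by
  show ((List.count k (peers.map pvChunksOf).flatten : Nat) : Int) = _
  rw [List.count_flatten, List.map_map]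
  push_cast
  rw [List.map_map]
  simp only [PySem.List.count, Function.comp_def]

theorem get_rarest_chunk_spec_aux (peers : List (List (String × List Int))) (needed_chunks : List Int)
    (hne : needed_chunks ≠ []) :
    get_rarest_chunk peers needed_chunks = get_rarest_chunk_alt peers needed_chunks := by
  unfold get_rarest_chunk get_rarest_chunk_alt
  have hflat : ∀ d0 : PySem.Dict Int Int,
      peers.foldl (fun d peer =>
          (pvChunksOf peer).foldl
            (fun d chunk => if d.contains chunk then d.modify chunk 0 (· + 1) else d) d) d0 =
        ((peers.map pvChunksOf).flatten).foldl pvStep d0 := by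
    intro d0
    rw [List.foldl_flatten, List.foldl_map]
    rfl
  rw [hflat]
  set S : List Int := PySem.Set.ofList needed_chunks with hS
  set d0 : PySem.Dict Int Int :=
    needed_chunks.foldl (fun d chunk => d.insert chunk 0) PySem.Dict.empty with hd0
  set dfin := ((peers.map pvChunksOf).flatten).foldl pvStep d0 with hdfin
  have hkeys0 : d0.keys = S := by rw [hd0, hS]; exact pv_keys_seed needed_chunks
  have hnd0 : d0.keys.Nodup := by
    rw [hd0]
    exact PySem.Dict.nodup_keys_foldl_insert needed_chunks (fun _ _ => (0 : Int)) _
      PySem.Dict.nodup_keys_empty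
  have hkeysf : dfin.keys = S := by rw [hdfin, pv_keys_foldl_step, hkeys0]
  have hndf : dfin.keys.Nodup := by rw [hkeysf, ← hkeys0]; exact hnd0
  have hgetD : ∀ k ∈ S, dfin.getD k 0 =
      (peers.map (fun peer => ((PySem.List.count (pvChunksOf peer) k : Nat) : Int))).sum := by
    intro k hk
    have hc : d0.contains k = true := by
      rw [PySem.Dict.contains_iff_mem_keys, hkeys0]; exact hk
    rw [hdfin, pv_getD_foldl_step, if_pos hc, hd0,
      pv_getD_seed needed_chunks k PySem.Dict.empty (fun j => PySem.Dict.getD_empty j 0),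
      ← pv_cnt_eq]
    ring
  have hitems : dfin.items =
      S.map (fun k => (k, (peers.map (fun peer => ((PySem.List.count (pvChunksOf peer) k : Nat) : Int))).sum)) := by
    rw [PySem.Dict.items_eq_map_keys dfin hndf 0, hkeysf]
    exact List.map_congr_left (fun k hk => by rw [hgetD k hk])
  rw [hitems]
  -- B's loop is min(items, key=snd) over the same list
  have hB : (PySem.List.dedup needed_chunks).foldl (fun (best : Option (Int × Int)) chunk =>
        let count : Int := (peers.map (fun peer => ((PySem.List.count (pvChunksOf peer) chunk : Nat) : Int))).sum
        match best with
        | none => some (chunk, count)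
        | some (b, bc) => if count < bc then some (chunk, count) else some (b, bc)) none =
      PySem.List.min?
        (S.map (fun k => (k, (peers.map (fun peer => ((PySem.List.count (pvChunksOf peer) k : Nat) : Int))).sum)))
        (fun item => item.2) := by
    rw [PySem.List.dedup_eq_ofList, ← hS]
    unfold PySem.List.min?
    rw [List.foldl_map]
    apply PySem.List.foldl_congr_mem
    intro b x _
    cases b with
    | none => rfl
    | some p => cases p; rfl
  rw [hB]
  have hA := pv_head_sorted_eq_min?
    (S.map (fun k => (k, (peers.map (fun peer => ((PySem.List.count (pvChunksOf peer) k : Nat) : Int))).sum)))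
    (fun item => item.2)
  cases hm : PySem.List.min?
      (S.map (fun k => (k, (peers.map (fun peer => ((PySem.List.count (pvChunksOf peer) k : Nat) : Int))).sum)))
      (fun item => item.2) with
  | none =>
    exfalso
    rw [PySem.List.min?_eq_none_iff, List.map_eq_nil_iff] at hm
    cases needed_chunks with
    | nil => exact hne rfl
    | cons c t =>
      have hcm : c ∈ S := by rw [hS, PySem.Set.mem_ofList]; exact List.mem_cons_self
      rw [hm] at hcm
      exact absurd hcm List.not_mem_nil
  | some p =>
    rw [hm] at hA
    cases hs : PySem.List.sorted
        (S.map (fun k => (k, (peers.map (fun peer => ((PySem.List.count (pvChunksOf peer) k : Nat) : Int))).sum)))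
        (fun item => item.2) false with
    | nil => rw [hs] at hA; simp at hA
    | cons q t =>
      rw [hs] at hA
      simp only [List.head?, Option.some.injEq] at hA
      cases p with
      | mk b bc =>
        subst hA
        rfl

-- ===== VERDICT (by name: the statement is the Claim_ definition above) =====
theorem get_rarest_chunk_spec : Claim_equal_get_rarest_chunk := by
  intro peers needed_chunks _ hpre
  unfold Spec_get_rarest_chunk
  exact (get_rarest_chunk_spec_aux peers needed_chunks hpre.1)
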